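-- pv_equiv track=rewrite | github.com/J5ong/Bigddata-analysis-and-prediction-of-film-website | py/prediction_model/MoviePredictionModel.py | getTransition
-- ===== SOURCE A (Python) =====
-- def getTransition(i,m):
--     list=[0 for n in range(m)]
--     k=list.__len__()
--     for j in range(i.__len__()-1, -1, -1):
--         if(k-1>=0):
--             list[k - 1] = i[j]
--             k = k - 1
--     return list
-- ===== SOURCE B (Python) =====
-- def getTransition(i, m):
--     if m <= 0:
--         return []
--     tail = list(i[-m:])
--     return [0] * (m - len(tail)) + tail
-- ===== Notes on version B (the rewrite author's own statement) =====
-- stated objective: simpler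
-- what changed: B replaces the backward index loop that assigns into a preallocated zero list one position at a time with a direct slice-and-concatenate: the last min(m,len(i)) elements prefixed by a zero pad.
import Mathlib
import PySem

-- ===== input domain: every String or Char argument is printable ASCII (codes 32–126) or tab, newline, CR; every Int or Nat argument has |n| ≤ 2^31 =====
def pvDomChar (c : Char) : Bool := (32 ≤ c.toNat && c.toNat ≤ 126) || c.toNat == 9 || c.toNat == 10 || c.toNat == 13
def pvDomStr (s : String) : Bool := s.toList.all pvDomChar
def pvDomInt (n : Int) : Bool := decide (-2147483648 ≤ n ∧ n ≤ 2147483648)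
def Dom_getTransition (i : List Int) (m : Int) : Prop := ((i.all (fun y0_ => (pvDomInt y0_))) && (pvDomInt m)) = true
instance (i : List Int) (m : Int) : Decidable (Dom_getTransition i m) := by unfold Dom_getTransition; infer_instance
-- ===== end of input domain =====

-- B right-aligns i into a zero-padded list of length m by slice-and-concatenate instead of A's backward index loop; objective: simpler.

-- ===== PORT A =====
-- one step of A's for-loop body: state is (list, k)
def getTransitionStep (i : List Int) (st : List Int × Int) (j : Int) : List Int × Int :=
  if st.2 - 1 ≥ 0 then
    (PySem.List.pySetD st.1 (st.2 - 1) (PySem.List.pyGetD i j 0), st.2 - 1)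
  else st

def getTransition (i : List Int) (m : Int) : List Int :=
  let lst := (PySem.List.pyRange 0 m 1).map (fun _ => (0 : Int))
  let k : Int := lst.length
  ((PySem.List.pyRange ((i.length : Int) - 1) (-1) (-1)).foldl (getTransitionStep i) (lst, k)).1

-- ===== PORT B =====
def getTransition_alt (i : List Int) (m : Int) : List Int :=
  if m ≤ 0 then []
  else
    let tail := PySem.List.slice i (some (-m)) none
    List.replicate (m - (tail.length : Int)).toNat 0 ++ tail

-- ===== PRECONDITION & SPEC =====
def Spec_getTransition (i : List Int) (m : Int) (out : List Int) : Prop := out = getTransition_alt i m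
instance (i : List Int) (m : Int) (out : List Int) : Decidable (Spec_getTransition i m out) := by unfold Spec_getTransition; infer_instance

-- ===== CLAIM (what is proved, stated in full; the proofs are below) =====
def Claim_equal_getTransition : Prop := ∀ (i : List Int) (m : Int), Dom_getTransition i m → Spec_getTransition i m (getTransition i m)

-- ===== LEMMAS AND PROOFS =====

-- A's loop writes xs backwards into the replicate-block; t is the already-written suffix.
theorem loop_invariant (xs : List Int) (k : Nat) (t : List Int) :
    ((xs.foldl (fun st x =>
        if st.2 - 1 ≥ 0 then
          (PySem.List.pySetD st.1 (st.2 - 1) x, st.2 - 1)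
        else st) (List.replicate k (0:Int) ++ t, (k : Int)))).1
      = List.replicate (k - xs.length) (0:Int) ++ (xs.take k).reverse ++ t := by
  induction xs generalizing k t with
  | nil => simp
  | cons x xs ih =>
    cases k with
    | zero =>
      simp only [List.foldl_cons]
      norm_num
      have h0 : ∀ t', ((xs.foldl (fun st x =>
          if st.2 - 1 ≥ 0 then (PySem.List.pySetD st.1 (st.2 - 1) x, st.2 - 1) else st)
          (t', (0:Int)))).1 = t' := by
        intro t'
        have := ih 0 t'
        simpa using this
      simpa using h0 t
    | succ k' =>
      simp only [List.foldl_cons]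
      have hcond : ((k' + 1 : Nat) : Int) - 1 ≥ 0 := by push_cast; omega
      rw [if_pos hcond]
      have hidx : ((k' + 1 : Nat) : Int) - 1 = ((k' : Nat) : Int) := by push_cast; ring
      have hset : PySem.List.pySetD (List.replicate (k' + 1) (0:Int) ++ t) (((k' + 1 : Nat) : Int) - 1) x
          = List.replicate k' (0:Int) ++ x :: t := by
        rw [hidx, PySem.List.pySetD_natCast]
        have : (List.replicate (k' + 1) (0:Int) ++ t) = List.replicate k' (0:Int) ++ (0 :: t) := by
          simp [List.replicate_succ']
        rw [this, List.set_append]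
        simp
      rw [hset, hidx]
      have := ih k' (x :: t)
      rw [this]
      simp [List.take_succ_cons]

theorem getTransition_spec : Claim_equal_getTransition := by
  intro i m _
  unfold Spec_getTransition getTransition getTransition_alt getTransitionStep
  by_cases hm : m ≤ 0
  · have hrange : PySem.List.pyRange 0 m 1 = ([] : List Int) := by
      rw [PySem.List.pyRange_one]
      have h0' : (m - 0).toNat = 0 := by omega
      rw [h0']
      simp
    rw [hrange, if_pos hm]
    simp only [List.map_nil, List.length_nil, Nat.cast_zero]
    have h0 : (List.replicate 0 (0:Int) ++ ([] : List Int), ((0:Nat) : Int)) = (([] : List Int), (0:Int)) := by simp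
    have := loop_invariant ((PySem.List.pyRange ((i.length : Int) - 1) (-1) (-1)).map (fun j => PySem.List.pyGetD i j 0)) 0 []
    rw [h0] at this
    rw [List.foldl_map] at this
    simpa using this
  · rw [if_neg hm]
    set M := m.toNat with hM
    have hmM : m = (M : Int) := by omega
    have hMpos : 0 < M := by omega
    -- the initial list is M zeros
    have hlst : (PySem.List.pyRange 0 m 1).map (fun _ => (0 : Int)) = List.replicate M (0:Int) := by
      rw [PySem.List.pyRange_one]
      simp only [List.map_map]
      rw [List.eq_replicate_iff]
      refine ⟨by simp; omega, by intro b hb; simp at hb; exact hb.2.symm⟩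
    rw [hlst]
    -- the traversal order is i reversed
    have hjs : PySem.List.pyRange ((i.length : Int) - 1) (-1) (-1)
        = (PySem.List.pyRange 0 (i.length : Int) 1).reverse := by
      rw [PySem.List.pyRange_neg_one_eq_reverse]
      norm_num
    have hmap : (PySem.List.pyRange 0 (i.length : Int) 1).map (fun j => PySem.List.pyGetD i j 0) = i := by
      exact PySem.List.map_pyGetD_pyRange_zero' i 0
    have hfold : ((PySem.List.pyRange ((i.length : Int) - 1) (-1) (-1)).foldl
        (fun (st : List Int × Int) j =>
          if st.2 - 1 ≥ 0 then (PySem.List.pySetD st.1 (st.2 - 1) (PySem.List.pyGetD i j 0), st.2 - 1) else st)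
        (List.replicate M (0:Int), ((List.replicate M (0:Int)).length : Int))).1
        = List.replicate (M - i.reverse.length) (0:Int) ++ (i.reverse.take M).reverse ++ [] := by
      have hmap' : (PySem.List.pyRange ((i.length : Int) - 1) (-1) (-1)).map (fun j => PySem.List.pyGetD i j 0) = i.reverse := by
        rw [hjs, List.map_reverse, hmap]
      rw [← List.foldl_map (f := (fun j => PySem.List.pyGetD i j 0))
            (g := (fun (st : List Int × Int) x => if st.2 - 1 ≥ 0 then (PySem.List.pySetD st.1 (st.2 - 1) x, st.2 - 1) else st))]
      rw [hmap']
      simpa using loop_invariant i.reverse M []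
    rw [hfold]
    -- identify B's tail
    have htail : PySem.List.slice i (some (-m)) none = i.drop (i.length - M) := by
      rw [hmM]
      exact PySem.List.slice_from_neg_natCast i M hMpos
    rw [htail]
    have hlen : (i.drop (i.length - M)).length = i.length - (i.length - M) := by
      simp
    rw [List.append_nil, List.take_reverse, List.reverse_reverse]
    have hcount : M - i.reverse.length = (m - ((i.drop (i.length - M)).length : Int)).toNat := by
      simp only [List.length_reverse, List.length_drop]
      omega
    rw [hcount]
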